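-- pv_equiv track=rewrite | github.com/abcphong/SWE300009--Software-Testing-and-Reliability | test_script.py | mutant15
-- ===== SOURCE A (Python) =====
-- def mutant15(arr):
--     if len(arr) > 1:
--         mid = len(arr) // 2
--         left_half = arr[:mid]
--         right_half = arr[mid:]
--
--         mutant15(left_half)
--         mutant15(right_half)
--
--         i = j = k = 0
--
--         while i < len(left_half) and j < len(right_half):
--             arr[k] = right_half[j]  # Mutation here
--             j += 1
--             k += 1
--
--         while i < len(left_half):
--             arr[k] = left_half[i]
--             i += 1
--             k += 1
--
--         while j < len(right_half):
--             arr[k] = right_half[j]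
--             j += 1
--             k += 1
--     return arr
-- ===== SOURCE B (Python) =====
-- def mutant15(arr):
--     # The broken "merge" in A copies the whole (recursively processed) right
--     # half before the left half, so the result is exactly the reversal.
--     # Like A, this mutates arr in place and returns it.
--     arr.reverse()
--     return arr
-- ===== Notes on version B (the rewrite author's own statement) =====
-- stated objective: faster
-- what changed: A's recursive half-splitting with the broken merge (i never advances) just concatenates the processed right half before the left half, which is exactly list reversal; B replaces the whole recursion by a single in-place reverse.
import Mathlib
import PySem

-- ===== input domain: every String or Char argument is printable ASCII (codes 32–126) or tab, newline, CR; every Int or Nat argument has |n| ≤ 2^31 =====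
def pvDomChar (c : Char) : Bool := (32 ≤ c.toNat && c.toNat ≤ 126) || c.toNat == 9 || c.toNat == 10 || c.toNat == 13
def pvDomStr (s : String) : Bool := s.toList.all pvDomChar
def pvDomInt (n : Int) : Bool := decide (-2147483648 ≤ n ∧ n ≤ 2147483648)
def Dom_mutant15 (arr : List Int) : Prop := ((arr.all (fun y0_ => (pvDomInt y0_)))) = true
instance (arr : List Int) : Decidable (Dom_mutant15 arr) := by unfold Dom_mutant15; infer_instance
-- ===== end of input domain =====

-- B replaces A's recursive half-splitting (whose broken merge concatenates the processed
-- right half before the left half, i.e. reverses) by a single in-place reverse; like A,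
-- the Python B mutates arr in place and returns it (same side effect).


-- ===== PORT A =====
-- The first while loop: condition 'i < len(left) and j < len(right)', body writes
-- right[j] into arr[k] and advances j and k only (i is never changed).
-- State is (arr, i, j, k), Python's in-place arr[k] = v is List.set (k is always in
-- range here, cf. the specs below). right.getD j 0 = Python's right_half[j]: the guard
-- guarantees j < right.length, so the default is never used.
def m15loop1 (left right : List Int) (arr : List Int) (i j k : Nat) :
    List Int × Nat × Nat × Nat :=
  if _h : i < left.length ∧ j < right.length then
    m15loop1 left right (arr.set k (right.getD j 0)) i (j+1) (k+1)
  else (arr, i, j, k)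
termination_by right.length - j

-- The second and third while loops are the same code up to renaming
-- ('while idx < len(src): arr[k] = src[idx]; idx += 1; k += 1'): one helper, used twice.
def m15copy (src : List Int) (arr : List Int) (idx k : Nat) : List Int × Nat × Nat :=
  if _h : idx < src.length then
    m15copy src (arr.set k (src.getD idx 0)) (idx+1) (k+1)
  else (arr, idx, k)
termination_by src.length - idx

-- arr[:mid] and arr[mid:] are PySem slices; len(arr)//2 on a Nat length is Nat division.
def mutant15 (arr : List Int) : List Int :=
  if _h : arr.length > 1 then
    let mid : Nat := arr.length / 2
    let left_half := PySem.List.slice arr none (some (mid : Int))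
    let right_half := PySem.List.slice arr (some (mid : Int)) none
    let left_half := mutant15 left_half
    let right_half := mutant15 right_half
    let r1 := m15loop1 left_half right_half arr 0 0 0
    let r2 := m15copy left_half r1.1 r1.2.1 r1.2.2.2
    let r3 := m15copy right_half r2.1 r1.2.2.1 r2.2.2
    r3.1
  else arr
termination_by arr.length
decreasing_by
  · rw [PySem.List.slice_to_natCast]; simp only [List.length_take]; omega
  · rw [PySem.List.slice_from_natCast]; simp only [List.length_drop]; omega

-- ===== PORT B =====
def mutant15_alt (arr : List Int) : List Int := arr.reverse

-- ===== PRECONDITION & SPEC =====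
def Spec_mutant15 (arr : List Int) (out : List Int) : Prop := out = mutant15_alt arr
instance (arr : List Int) (out : List Int) : Decidable (Spec_mutant15 arr out) := by unfold Spec_mutant15; infer_instance

-- ===== CLAIM (what is proved, stated in full; the proofs are below) =====
def Claim_equal_mutant15 : Prop := ∀ (arr : List Int), Dom_mutant15 arr → Spec_mutant15 arr (mutant15 arr)

-- ===== LEMMAS AND PROOFS =====

-- Copy loop: writes src[idx:] into arr at positions k, k+1, …
theorem m15copy_spec (src : List Int) :
    ∀ (idx k : Nat) (arr : List Int), idx ≤ src.length →
      k + (src.length - idx) ≤ arr.length →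
      m15copy src arr idx k =
        (arr.take k ++ src.drop idx ++ arr.drop (k + (src.length - idx)),
         src.length, k + (src.length - idx)) := by
  intro idx k arr hidx hlen
  fun_induction m15copy src arr idx k with
  | case1 arr idx k h ih =>
    have hk : k < arr.length := by omega
    rw [ih (by omega) (by simp; omega)]
    have h3 : k + 1 + (src.length - (idx + 1)) = k + (src.length - idx) := by omega
    rw [h3]
    refine Prod.ext ?_ rfl
    have hA : List.take (k+1) (arr.set k (src.getD idx 0)) = List.take k arr ++ [src.getD idx 0] := by
      rw [List.take_add_one]; simp [hk, List.take_set, List.set_eq_of_length_le]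
    have hB : List.drop (k + (src.length - idx)) (arr.set k (src.getD idx 0)) = List.drop (k + (src.length - idx)) arr := by
      rw [List.drop_set_of_lt]; omega
    have hC : List.drop idx src = src.getD idx 0 :: List.drop (idx+1) src := by
      rw [List.drop_eq_getElem_cons h, List.getD_eq_getElem _ _ h]
    rw [hA, hB, hC]
    simp
  | case2 arr idx k h =>
    have h2 : idx = src.length := by omega
    simp [h2, List.drop_length, List.take_append_drop]

-- With a nonempty left half the first loop's guard is just j < right.length
-- (i stays 0), so it is the copy loop on the right half.
theorem m15loop1_eq (left right : List Int) (h : 0 < left.length) :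
    ∀ (j k : Nat) (arr : List Int),
      m15loop1 left right arr 0 j k =
        ((m15copy right arr j k).1, 0, (m15copy right arr j k).2.1,
          (m15copy right arr j k).2.2) := by
  intro j k arr
  fun_induction m15loop1 left right arr 0 j k with
  | case1 arr j k hg ih =>
    have hstep : m15copy right arr j k =
        m15copy right (arr.set k (right.getD j 0)) (j+1) (k+1) := by
      rw [m15copy]; simp [hg.2]
    rw [hstep]; exact ih
  | case2 arr j k hg =>
    have hj : ¬ j < right.length := fun hj => hg ⟨h, hj⟩
    rw [m15copy]
    simp [hj]

theorem mutant15_eq_reverse (arr : List Int) : mutant15 arr = arr.reverse := by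
  by_cases h : arr.length > 1
  · have hL := mutant15_eq_reverse (arr.take (arr.length / 2))
    have hR := mutant15_eq_reverse (arr.drop (arr.length / 2))
    rw [mutant15, dif_pos h]
    simp only [PySem.List.slice_to_natCast, PySem.List.slice_from_natCast, hL, hR]
    set L := (arr.take (arr.length / 2)).reverse with hLdef
    set R := (arr.drop (arr.length / 2)).reverse with hRdef
    have hLlen : L.length = arr.length / 2 := by simp [hLdef]; omega
    have hRlen : R.length = arr.length - arr.length / 2 := by simp [hRdef]
    have h1 : 0 < L.length := by omega
    rw [m15loop1_eq L R h1]
    rw [m15copy_spec R 0 0 arr (by omega) (by omega)]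
    simp only [List.take_zero, List.drop_zero, List.nil_append, Nat.zero_add, Nat.sub_zero]
    rw [m15copy_spec L 0 R.length (R ++ arr.drop R.length) (by omega)
        (by simp; omega)]
    simp only [List.drop_zero, Nat.sub_zero]
    have hbase : ¬ R.length < R.length := by omega
    rw [m15copy, dif_neg (by simp)]
    have htake : List.take R.length (R ++ arr.drop R.length) = R := by simp
    have hdropall : List.drop (R.length + L.length) (R ++ arr.drop R.length) = [] := by
      apply List.drop_eq_nil_of_le
      simp
      omega
    rw [htake, hdropall]
    rw [List.append_nil, hLdef, hRdef, ← List.reverse_append, List.take_append_drop]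
  · rw [mutant15, dif_neg h]
    rcases arr with _ | ⟨a, _ | ⟨b, t⟩⟩
    · rfl
    · rfl
    · exfalso; simp at h
termination_by arr.length
decreasing_by
  · simp; omega
  · simp; omega

-- ===== VERDICT (by name: the statement is the Claim_ definition above) =====
theorem mutant15_spec : Claim_equal_mutant15 := by
  intro arr _
  unfold Spec_mutant15 mutant15_alt
  exact mutant15_eq_reverse arr
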